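-- pv_equiv track=rewrite | github.com/wheezy722/WaterortonAQI | WaterOrtonAQI.py | determine_pollution_level
-- ===== SOURCE A (Python) =====
-- def determine_pollution_level(pollutants):
--     """
--     Determines the pollution level based on DEFRA thresholds.
--     Returns "low", "mediocre", "high", or "emergency".
--     """
--     DEFRA_LIMITS = {
--         "PM2.5": {"moderate": 12, "high": 24, "emergency": 36},
--         "PM10":  {"moderate": 17, "high": 34, "emergency": 50},
--         "NO2":   {"moderate": 67, "high": 134, "emergency": 200},
--         "NO":    {"moderate": 25, "high": 50, "emergency": 75}
--     }
--     level = "low"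
--     for pollutant, value in pollutants.items():
--         limits = DEFRA_LIMITS.get(pollutant)
--         if limits:
--             if value > limits["emergency"]:
--                 return "emergency"
--             elif value > limits["high"]:
--                 level = "high"
--             elif value > limits["moderate"] and level not in ("high", "emergency"):
--                 level = "mediocre"
--     return level
-- ===== SOURCE B (Python) =====
-- def determine_pollution_level(pollutants):
--     """
--     Determines the pollution level based on DEFRA thresholds.
--     Returns "low", "mediocre", "high", or "emergency".
--     """
--     DEFRA_LIMITS = {
--         "PM2.5": (12, 24, 36),
--         "PM10":  (17, 34, 50),
--         "NO2":   (67, 134, 200),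
--         "NO":    (25, 50, 75),
--     }
--     # Stage 1: severity rank of each known pollutant = number of thresholds exceeded.
--     ranks = [sum(value > t for t in DEFRA_LIMITS[p])
--              for p, value in pollutants.items() if p in DEFRA_LIMITS]
--     # Stage 2: the overall level is the worst (maximum) rank.
--     return ("low", "mediocre", "high", "emergency")[max(ranks, default=0)]
-- ===== Notes on version B (the rewrite author's own statement) =====
-- stated objective: simpler
-- what changed: Replaces the stateful loop with its early return and guarded level-string updates by two stages: an eager comprehension that counts, per known pollutant, how many thresholds its value exceeds, followed by a max-reduction indexed into a name tuple.
import Mathlib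
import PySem

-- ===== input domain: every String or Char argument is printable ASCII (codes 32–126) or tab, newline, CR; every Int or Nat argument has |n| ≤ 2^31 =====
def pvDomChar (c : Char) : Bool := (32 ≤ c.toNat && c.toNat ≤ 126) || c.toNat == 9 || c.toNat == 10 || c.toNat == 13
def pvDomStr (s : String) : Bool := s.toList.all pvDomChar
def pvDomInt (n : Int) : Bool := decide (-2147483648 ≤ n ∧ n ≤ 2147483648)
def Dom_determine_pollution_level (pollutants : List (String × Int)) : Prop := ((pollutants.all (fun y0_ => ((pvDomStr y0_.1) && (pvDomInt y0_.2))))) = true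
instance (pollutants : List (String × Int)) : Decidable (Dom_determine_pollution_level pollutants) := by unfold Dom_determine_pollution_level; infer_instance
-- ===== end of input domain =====

-- B replaces the stateful loop (early return + guarded level-string updates) by two stages:
-- rank each known pollutant by counting exceeded thresholds, then index the max rank into a
-- name tuple (objective: simpler).

-- ===== PORT A =====
-- DEFRA_LIMITS: dict of dicts, as an association list of association lists (insertion order).
def defraLimitsA : PySem.Dict String (PySem.Dict String Int) :=
  PySem.Dict.ofList [("PM2.5", PySem.Dict.ofList [("moderate", 12), ("high", 24), ("emergency", 36)]),
   ("PM10",  PySem.Dict.ofList [("moderate", 17), ("high", 34), ("emergency", 50)]),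
   ("NO2",   PySem.Dict.ofList [("moderate", 67), ("high", 134), ("emergency", 200)]),
   ("NO",    PySem.Dict.ofList [("moderate", 25), ("high", 50), ("emergency", 75)])]

-- the for-loop of A, carrying the 'level' string
def loopA : List (String × Int) → String → String
  | [], level => level
  | (pollutant, value) :: rest, level =>
    match PySem.Dict.get? defraLimitsA pollutant with
    | none => loopA rest level                    -- limits is None: falsy, skip
    | some limits =>                              -- nonempty dict literal: truthy
      -- keys "emergency"/"high"/"moderate" are present in every entry of the literal; getD is exact here
      if value > PySem.Dict.getD limits "emergency" 0 then "emergency"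
      else if value > PySem.Dict.getD limits "high" 0 then loopA rest "high"
      else if value > PySem.Dict.getD limits "moderate" 0 ∧ level ≠ "high" ∧ level ≠ "emergency"
        then loopA rest "mediocre"
      else loopA rest level

def determine_pollution_level (pollutants : List (String × Int)) : String :=
  loopA pollutants "low"

-- ===== PORT B =====
-- DEFRA_LIMITS of Source B: dict of (moderate, high, emergency) triples
def defraLimitsB : PySem.Dict String (Int × Int × Int) :=
  PySem.Dict.ofList [("PM2.5", (12, 24, 36)), ("PM10", (17, 34, 50)), ("NO2", (67, 134, 200)), ("NO", (25, 50, 75))]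

-- the comprehension: [sum(value > t for t in DEFRA_LIMITS[p]) for p, value in pollutants.items() if p in DEFRA_LIMITS]
def ranksB (pollutants : List (String × Int)) : List Int :=
  pollutants.filterMap (fun pv =>
    match PySem.Dict.get? defraLimitsB pv.1 with    -- 'p in DEFRA_LIMITS' + lookup DEFRA_LIMITS[p]
    | none => none
    | some (m, h, e) =>                             -- sum over the 3-tuple, booleans as 0/1
      some ((0 + (if pv.2 > m then (1:Int) else 0)) + (if pv.2 > h then 1 else 0) + (if pv.2 > e then 1 else 0)))

def determine_pollution_level_alt (pollutants : List (String × Int)) : String :=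
  let ranks := ranksB pollutants
  -- max(ranks, default=0)
  let r : Int := match PySem.List.max? ranks (fun x => x) with | none => 0 | some m => m
  -- tuple indexing ("low","mediocre","high","emergency")[r]; r is always in range 0..3 (a rank
  -- counts at most 3 thresholds), so the .getD fallback is never taken and the port is exact here
  (PySem.List.pyGet? ["low", "mediocre", "high", "emergency"] r).getD ""

-- ===== PRECONDITION & SPEC =====
def Spec_determine_pollution_level (pollutants : List (String × Int)) (out : String) : Prop := out = determine_pollution_level_alt pollutants
instance (pollutants : List (String × Int)) (out : String) : Decidable (Spec_determine_pollution_level pollutants out) := by unfold Spec_determine_pollution_level; infer_instance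

-- ===== CLAIM =====
def Claim_equal_determine_pollution_level : Prop := ∀ (pollutants : List (String × Int)), Dom_determine_pollution_level pollutants → Spec_determine_pollution_level pollutants (determine_pollution_level pollutants)

-- ===== LEMMAS AND PROOFS =====

-- severity rank of one (pollutant, value) pair, 0 for unknown pollutants
def rankOf (pv : String × Int) : Int :=
  match PySem.Dict.get? defraLimitsB pv.1 with
  | none => 0
  | some (m, h, e) =>
      (0 + (if pv.2 > m then (1:Int) else 0)) + (if pv.2 > h then 1 else 0) + (if pv.2 > e then 1 else 0)

-- the running maximum of ranks
def maxRank (l : List (String × Int)) (b : Int) : Int :=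
  l.foldl (fun acc x => max acc (rankOf x)) b

-- map a rank back to A's level string
def nameOf (r : Int) : String :=
  if r = 0 then "low" else if r = 1 then "mediocre" else if r = 2 then "high" else "emergency"

lemma maxRank_cons (p : String) (v : Int) (tl : List (String × Int)) (b : Int) :
    maxRank ((p, v) :: tl) b = maxRank tl (max b (rankOf (p, v))) := rfl

lemma rankOf_le_three (pv : String × Int) : rankOf pv ≤ 3 := by
  unfold rankOf
  cases PySem.Dict.get? defraLimitsB pv.1 with
  | none => simp
  | some t => obtain ⟨m, h, e⟩ := t; dsimp only; split_ifs <;> omega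

lemma maxRank_three (l : List (String × Int)) : maxRank l 3 = 3 := by
  induction l with
  | nil => rfl
  | cons x tl ih =>
    have := rankOf_le_three x
    obtain ⟨p, v⟩ := x
    rw [maxRank_cons, show max 3 (rankOf (p, v)) = 3 by omega]
    exact ih

-- B's table lookup can only produce one of the four literal triples
lemma get?B_cases (p : String) :
    PySem.Dict.get? defraLimitsB p = none ∨
    PySem.Dict.get? defraLimitsB p = some (12, 24, 36) ∨
    PySem.Dict.get? defraLimitsB p = some (17, 34, 50) ∨
    PySem.Dict.get? defraLimitsB p = some (67, 134, 200) ∨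
    PySem.Dict.get? defraLimitsB p = some (25, 50, 75) := by
  by_cases h1 : p = "PM2.5"
  · subst h1; right; left; rfl
  by_cases h2 : p = "PM10"
  · subst h2; right; right; left; rfl
  by_cases h3 : p = "NO2"
  · subst h3; right; right; right; left; rfl
  by_cases h4 : p = "NO"
  · subst h4; right; right; right; right; rfl
  left
  simp [defraLimitsB, PySem.Dict.get?, PySem.Dict.ofList, PySem.Dict.update,
        PySem.Dict.empty, PySem.Dict.insert, PySem.Dict.contains, List.find?,
        show ("PM2.5" == p) = false from beq_eq_false_iff_ne.mpr (fun h => h1 h.symm),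
        show ("PM10" == p) = false from beq_eq_false_iff_ne.mpr (fun h => h2 h.symm),
        show ("NO2" == p) = false from beq_eq_false_iff_ne.mpr (fun h => h3 h.symm),
        show ("NO" == p) = false from beq_eq_false_iff_ne.mpr (fun h => h4 h.symm)]

-- the two constant tables agree: same keys, triple = (moderate, high, emergency)
lemma tables_agree (p : String) :
    PySem.Dict.get? defraLimitsB p =
      (PySem.Dict.get? defraLimitsA p).map (fun l =>
        (PySem.Dict.getD l "moderate" 0, PySem.Dict.getD l "high" 0, PySem.Dict.getD l "emergency" 0)) := by
  by_cases h1 : p = "PM2.5"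
  · subst h1; rfl
  by_cases h2 : p = "PM10"
  · subst h2; rfl
  by_cases h3 : p = "NO2"
  · subst h3; rfl
  by_cases h4 : p = "NO"
  · subst h4; rfl
  simp [defraLimitsB, defraLimitsA, PySem.Dict.get?, PySem.Dict.ofList, PySem.Dict.update,
        PySem.Dict.empty, PySem.Dict.insert, PySem.Dict.contains, List.find?,
        show ("PM2.5" == p) = false from beq_eq_false_iff_ne.mpr (fun h => h1 h.symm),
        show ("PM10" == p) = false from beq_eq_false_iff_ne.mpr (fun h => h2 h.symm),
        show ("NO2" == p) = false from beq_eq_false_iff_ne.mpr (fun h => h3 h.symm),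
        show ("NO" == p) = false from beq_eq_false_iff_ne.mpr (fun h => h4 h.symm)]

-- one step of the loop over a known pollutant with triple (m, h, e)
lemma loopA_cons_known
    (p : String) (v : Int) (tl : List (String × Int)) (b : Int)
    (hb : b = 0 ∨ b = 1 ∨ b = 2)
    (limits : PySem.Dict String Int) (m h e : Int)
    (hA : PySem.Dict.get? defraLimitsA p = some limits)
    (hB : PySem.Dict.get? defraLimitsB p = some (m, h, e))
    (hm : PySem.Dict.getD limits "moderate" 0 = m)
    (hh : PySem.Dict.getD limits "high" 0 = h)
    (he : PySem.Dict.getD limits "emergency" 0 = e)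
    (hmh : m < h) (hhe : h < e)
    (i0 : loopA tl (nameOf 0) = nameOf (maxRank tl 0))
    (i1 : loopA tl (nameOf 1) = nameOf (maxRank tl 1))
    (i2 : loopA tl (nameOf 2) = nameOf (maxRank tl 2)) :
    loopA ((p, v) :: tl) (nameOf b) = nameOf (maxRank ((p, v) :: tl) b) := by
  have hrk : rankOf (p, v) =
      (0 + (if v > m then (1:Int) else 0)) + (if v > h then 1 else 0) + (if v > e then 1 else 0) := by
    simp [rankOf, hB]
  rw [maxRank_cons]
  by_cases c3 : v > e
  · have r3 : rankOf (p, v) = 3 := by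
      rw [hrk, if_pos c3, if_pos (by omega : v > h), if_pos (by omega : v > m)]; norm_num
    rw [r3, show max b 3 = 3 by omega, maxRank_three]
    simp [loopA, hA, he, c3, nameOf]
  · by_cases c2 : v > h
    · have r2 : rankOf (p, v) = 2 := by
        rw [hrk, if_neg c3, if_pos c2, if_pos (by omega : v > m)]; norm_num
      rw [r2, show max b 2 = 2 by omega, ← i2]
      have hn2 : nameOf 2 = "high" := by norm_num [nameOf]
      rcases hb with rfl | rfl | rfl <;>
        simp [loopA, hA, hm, hh, he, c3, c2, hn2, nameOf]
    · by_cases c1 : v > m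
      · have r1 : rankOf (p, v) = 1 := by
          rw [hrk, if_neg c3, if_neg c2, if_pos c1]; norm_num
        rcases hb with rfl | rfl | rfl
        · rw [r1, show max (0:Int) 1 = 1 from rfl, ← i1]
          simp [loopA, hA, hm, hh, he, c3, c2, c1, nameOf]
        · rw [r1, show max (1:Int) 1 = 1 from rfl, ← i1]
          simp [loopA, hA, hm, hh, he, c3, c2, c1, nameOf]
        · rw [r1, show max (2:Int) 1 = 2 from rfl, ← i2]
          simp [loopA, hA, hm, hh, he, c3, c2, c1, nameOf]
      · have r0 : rankOf (p, v) = 0 := by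
          rw [hrk, if_neg c3, if_neg c2, if_neg c1]; norm_num
        rcases hb with rfl | rfl | rfl
        · rw [r0, show max (0:Int) 0 = 0 from rfl, ← i0]
          simp [loopA, hA, hm, hh, he, c3, c2, c1, nameOf]
        · rw [r0, show max (1:Int) 0 = 1 from rfl, ← i1]
          simp [loopA, hA, hm, hh, he, c3, c2, c1, nameOf]
        · rw [r0, show max (2:Int) 0 = 2 from rfl, ← i2]
          simp [loopA, hA, hm, hh, he, c3, c2, c1, nameOf]

-- loop invariant: A's level string is nameOf of the running maximum rank
lemma loopA_eq_maxRank (l : List (String × Int)) (b : Int) (hb : b = 0 ∨ b = 1 ∨ b = 2) :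
    loopA l (nameOf b) = nameOf (maxRank l b) := by
  induction l generalizing b with
  | nil => rfl
  | cons hd tl ih =>
    obtain ⟨p, v⟩ := hd
    have i0 := ih 0 (Or.inl rfl)
    have i1 := ih 1 (Or.inr (Or.inl rfl))
    have i2 := ih 2 (Or.inr (Or.inr rfl))
    have tb := tables_agree p
    rcases get?B_cases p with hB | hB | hB | hB | hB
    · -- unknown pollutant: A skips the pair, its rank is 0
      have hA : PySem.Dict.get? defraLimitsA p = none := by
        cases hA' : PySem.Dict.get? defraLimitsA p with
        | none => rfl
        | some _ => rw [hA'] at tb; simp [hB] at tb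
      have h0 : rankOf (p, v) = 0 := by simp [rankOf, hB]
      have hskip : loopA ((p, v) :: tl) (nameOf b) = loopA tl (nameOf b) := by
        simp [loopA, hA]
      rw [hskip, maxRank_cons, h0, show max b 0 = b by omega]
      exact ih b hb
    all_goals {
      rw [hB] at tb
      obtain ⟨limits, hA, hf⟩ := Option.map_eq_some_iff.mp tb.symm
      have hm := congrArg (fun t => t.1) hf
      have hh := congrArg (fun t => t.2.1) hf
      have he := congrArg (fun t => t.2.2) hf
      dsimp only at hm hh he
      exact loopA_cons_known p v tl b hb limits _ _ _ hA hB hm hh he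
        (by norm_num) (by norm_num) i0 i1 i2
    }

-- B's staged computation equals the running maximum of ranks
lemma foldl_ranksB (l : List (String × Int)) (b : Int) (hb : 0 ≤ b) :
    (ranksB l).foldl max b = maxRank l b := by
  induction l generalizing b with
  | nil => rfl
  | cons hd tl ih =>
    obtain ⟨p, v⟩ := hd
    cases hB : PySem.Dict.get? defraLimitsB p with
    | none =>
      have h0 : rankOf (p, v) = 0 := by simp [rankOf, hB]
      rw [show ranksB ((p, v) :: tl) = ranksB tl by simp [ranksB, List.filterMap_cons, hB],
          maxRank_cons, h0, show max b 0 = b by omega]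
      exact ih b hb
    | some t =>
      obtain ⟨m, h, e⟩ := t
      have hrk : rankOf (p, v) =
          (0 + (if v > m then (1:Int) else 0)) + (if v > h then 1 else 0) + (if v > e then 1 else 0) := by
        simp [rankOf, hB]
      rw [show ranksB ((p, v) :: tl) =
            ((0 + (if v > m then (1:Int) else 0)) + (if v > h then 1 else 0) + (if v > e then 1 else 0)) :: ranksB tl by
            simp [ranksB, List.filterMap_cons, hB],
          List.foldl_cons, maxRank_cons, ← hrk]
      exact ih _ (le_trans hb (le_max_left _ _))

lemma maxRank_nonneg (l : List (String × Int)) (b : Int) (hb : 0 ≤ b) : 0 ≤ maxRank l b := by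
  induction l generalizing b with
  | nil => exact hb
  | cons hd tl ih => exact ih _ (le_trans hb (le_max_left _ _))

lemma maxRank_le_three (l : List (String × Int)) (b : Int) (hb : b ≤ 3) : maxRank l b ≤ 3 := by
  induction l generalizing b with
  | nil => exact hb
  | cons hd tl ih => exact ih _ (max_le hb (rankOf_le_three hd))

lemma ranksB_nonneg (l : List (String × Int)) (x : Int) (hx : x ∈ ranksB l) : 0 ≤ x := by
  unfold ranksB at hx
  obtain ⟨pv, _, hpv⟩ := List.mem_filterMap.mp hx
  cases hB : PySem.Dict.get? defraLimitsB pv.1 with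
  | none => simp [hB] at hpv
  | some tr =>
    obtain ⟨m, h, e⟩ := tr
    simp only [hB] at hpv
    obtain ⟨rfl⟩ := Option.some_inj.mp hpv
    split_ifs <;> omega

lemma alt_eq_nameOf (l : List (String × Int)) :
    determine_pollution_level_alt l = nameOf (maxRank l 0) := by
  have hfold : (ranksB l).foldl max 0 = maxRank l 0 := foldl_ranksB l 0 le_rfl
  have h0 : 0 ≤ maxRank l 0 := maxRank_nonneg l 0 le_rfl
  have h3 : maxRank l 0 ≤ 3 := maxRank_le_three l 0 (by omega)
  unfold determine_pollution_level_alt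
  cases hR : ranksB l with
  | nil =>
    have hm0 : maxRank l 0 = 0 := by rw [← hfold, hR]; rfl
    rw [hm0]
    simp [hR, PySem.List.max?, nameOf, PySem.List.pyGet?, PySem.List.pyIdx?]
  | cons x t =>
    rw [hR] at hfold
    have hx0 : 0 ≤ x := ranksB_nonneg l x (by rw [hR]; exact List.mem_cons_self)
    have hmax : PySem.List.max? (x :: t) (fun y => y) = some (t.foldl max x) :=
      PySem.List.max?_id_cons x t
    have hfx : t.foldl max x = maxRank l 0 := by
      rw [← hfold]; simp [List.foldl_cons, show max 0 x = x by omega]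
    simp only [hR, hmax, hfx]
    have : maxRank l 0 = 0 ∨ maxRank l 0 = 1 ∨ maxRank l 0 = 2 ∨ maxRank l 0 = 3 := by omega
    rcases this with h | h | h | h <;> rw [h] <;> rfl

-- ===== VERDICT =====
theorem determine_pollution_level_spec : Claim_equal_determine_pollution_level := by
  intro pollutants _
  show determine_pollution_level pollutants = determine_pollution_level_alt pollutants
  rw [alt_eq_nameOf]
  have := loopA_eq_maxRank pollutants 0 (Or.inl rfl)
  simpa [determine_pollution_level, nameOf] using this
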